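-- pv_equiv track=rewrite | github.com/teacherandresrueda/retrocore-31 | core_ai.py | calcular_score
-- ===== SOURCE A (Python) =====
-- from collections import Counter
--
-- def analizar_frecuencia(historial):
--     numeros = [n for fila in historial for n in fila]
--     return Counter(numeros)
--
-- def calcular_score(historial):
--     conteo = analizar_frecuencia(historial)
--
--     score = {}
--
--     # recencia (últimos sorteos pesan más)
--     ultimos = historial[-3:]
--
--     for num in range(1,40):
--         frecuencia = conteo.get(num, 0)
--
--         # recencia
--         recencia = sum(1 for fila in ultimos if num in fila)
--
--         # ciclo (si no aparece hace tiempo)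
--         ciclos = 0
--         for fila in reversed(historial):
--             if num not in fila:
--                 ciclos += 1
--             else:
--                 break
--
--         # fórmula de score
--         score[num] = (
--             frecuencia * 2 +      # peso histórico
--             recencia * 3 +        # peso reciente
--             min(ciclos, 5)        # peso ciclo (limitado)
--         )
--
--     return score
-- ===== SOURCE B (Python) =====
-- def calcular_score(historial):
--     n = len(historial)
--
--     # total count per number
--     count = {}
--     for fila in historial:
--         for num in fila:
--             count[num] = count.get(num, 0) + 1
--
--     # last row index where each number appears
--     last = {}
--     for i, fila in enumerate(historial):
--         for num in fila:
--             last[num] = i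
--
--     # among the last three rows, in how many does each number appear
--     rec = {}
--     for fila in historial[-3:]:
--         for num in set(fila):
--             rec[num] = rec.get(num, 0) + 1
--
--     score = {}
--     for num in range(1, 40):
--         ciclos = n - 1 - last[num] if num in last else n
--         score[num] = count.get(num, 0) * 2 + rec.get(num, 0) * 3 + min(ciclos, 5)
--     return score
-- ===== Notes on version B (the rewrite author's own statement) =====
-- stated objective: alternative
-- what changed: B replaces A's per-number rescans (a membership scan of the whole history and a reversed break-loop for each of the 39 numbers) by linear passes that build count, last-occurrence-index and recent-row dictionaries once, deriving each number's ciclos from n-1-last[num].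
import Mathlib
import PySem

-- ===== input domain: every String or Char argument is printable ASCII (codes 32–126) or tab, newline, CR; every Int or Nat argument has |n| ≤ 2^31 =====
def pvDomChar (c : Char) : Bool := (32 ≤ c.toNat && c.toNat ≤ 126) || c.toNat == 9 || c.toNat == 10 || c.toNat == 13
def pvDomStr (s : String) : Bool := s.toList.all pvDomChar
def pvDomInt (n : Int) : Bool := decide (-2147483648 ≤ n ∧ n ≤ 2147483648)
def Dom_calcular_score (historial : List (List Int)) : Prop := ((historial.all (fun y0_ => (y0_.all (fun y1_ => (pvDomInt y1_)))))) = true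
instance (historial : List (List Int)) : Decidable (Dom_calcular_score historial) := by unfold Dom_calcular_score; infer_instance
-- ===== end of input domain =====

-- B is an alternative implementation: instead of A's per-number rescans of the whole
-- history, B builds count/last-occurrence/recent dictionaries in linear passes and
-- derives each number's ciclos from n - 1 - last[num].

-- ===== PORT A =====
-- 'for fila in reversed(historial): if num not in fila: ciclos += 1 else: break'
def pvCiclosLoop (num : Int) : List (List Int) → Int
  | [] => 0
  | fila :: rest => if fila.contains num then 0 else pvCiclosLoop num rest + 1

def analizar_frecuencia (historial : List (List Int)) : PySem.Dict Int Int :=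
  PySem.Dict.counter (historial.flatMap id)

def calcular_score (historial : List (List Int)) : List (Int × Int) :=
  let conteo := analizar_frecuencia historial
  let ultimos := PySem.List.slice historial (some (-3)) none
  ((PySem.List.pyRange 1 40 1).foldl (fun (score : PySem.Dict Int Int) num =>
      let frecuencia := conteo.getD num 0
      let recencia : Int := ((ultimos.filter (fun fila => fila.contains num)).map
        (fun _ => (1 : Int))).sum
      let ciclos := pvCiclosLoop num historial.reverse
      score.insert num (frecuencia * 2 + recencia * 3 + min ciclos 5))
    PySem.Dict.empty).items

-- ===== PORT B =====
def calcular_score_alt (historial : List (List Int)) : List (Int × Int) :=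
  let n : Int := historial.length
  let count := historial.foldl (fun d fila =>
      fila.foldl (fun (d : PySem.Dict Int Int) num => d.insert num (d.getD num 0 + 1)) d)
    PySem.Dict.empty
  let last := (PySem.List.enumerate historial 0).foldl (fun d p =>
      p.2.foldl (fun (d : PySem.Dict Int Int) num => d.insert num p.1) d)
    PySem.Dict.empty
  let rec_ := (PySem.List.slice historial (some (-3)) none).foldl (fun d fila =>
      (PySem.Set.ofList fila).foldl
        (fun (d : PySem.Dict Int Int) num => d.insert num (d.getD num 0 + 1)) d)
    PySem.Dict.empty
  ((PySem.List.pyRange 1 40 1).foldl (fun (score : PySem.Dict Int Int) num =>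
      let ciclos : Int := if last.contains num then n - 1 - (last.get? num).getD 0 else n
      score.insert num (count.getD num 0 * 2 + rec_.getD num 0 * 3 + min ciclos 5))
    PySem.Dict.empty).items

-- ===== PRECONDITION & SPEC =====
def Spec_calcular_score (historial : List (List Int)) (out : List (Int × Int)) : Prop := out = calcular_score_alt historial
instance (historial : List (List Int)) (out : List (Int × Int)) : Decidable (Spec_calcular_score historial out) := by unfold Spec_calcular_score; infer_instance

-- ===== CLAIM (what is proved, stated in full; the proofs are below) =====
def Claim_equal_calcular_score : Prop := ∀ (historial : List (List Int)), Dom_calcular_score historial → Spec_calcular_score historial (calcular_score historial)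

-- ===== LEMMAS AND PROOFS =====

-- pvCiclosLoop when no row contains num
lemma pvCiclosLoop_of_not_any (num : Int) (l : List (List Int))
    (h : l.any (fun f => f.contains num) = false) :
    pvCiclosLoop num l = l.length := by
  induction l with
  | nil => rfl
  | cons fila rest ih =>
    simp only [List.any_cons, Bool.or_eq_false_iff] at h
    rw [pvCiclosLoop, if_neg (by simpa using h.1), ih h.2, List.length_cons]
    push_cast; ring

lemma pvCiclosLoop_bounds (num : Int) (l : List (List Int)) :
    0 ≤ pvCiclosLoop num l ∧ pvCiclosLoop num l ≤ l.length := by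
  induction l with
  | nil => simp [pvCiclosLoop]
  | cons fila rest ih =>
    rw [pvCiclosLoop]
    split_ifs with h
    · simp; omega
    · simp only [List.length_cons]; push_cast; omega

lemma pvCiclosLoop_append (num : Int) (l l' : List (List Int)) :
    pvCiclosLoop num (l ++ l')
      = if l.any (fun f => f.contains num) then pvCiclosLoop num l
        else (l.length : Int) + pvCiclosLoop num l' := by
  induction l with
  | nil => simp [pvCiclosLoop]
  | cons fila rest ih =>
    rw [List.cons_append, pvCiclosLoop, pvCiclosLoop, ih]
    by_cases h : fila.contains num = true
    · rw [if_pos h, if_pos (by simp_all), if_pos h]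
    · by_cases h2 : rest.any (fun f => f.contains num) = true
      · rw [if_neg h, if_pos h2, if_pos (by simp_all), if_neg h]
      · rw [if_neg h, if_neg h2, if_neg (by simp_all), List.length_cons]
        push_cast; ring

-- B's count dictionary holds the flattened count
lemma count_fold_getD (l : List (List Int)) (d : PySem.Dict Int Int) (num : Int) :
    (l.foldl (fun d fila =>
        fila.foldl (fun (d : PySem.Dict Int Int) x => d.insert x (d.getD x 0 + 1)) d) d).getD num 0
      = d.getD num 0 + ((l.flatMap id).count num : Int) := by
  induction l generalizing d with
  | nil => simp
  | cons fila rest ih =>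
    simp only [List.foldl_cons, ih, PySem.Dict.getD_foldl_insert_add_one,
      List.flatMap_cons, List.count_append, id]
    push_cast; ring

-- inner loop of B's last dictionary: every key of fila is set to i
lemma last_inner_get? (fila : List Int) (i : Int) (d : PySem.Dict Int Int) (num : Int) :
    (fila.foldl (fun (d : PySem.Dict Int Int) x => d.insert x i) d).get? num
      = if fila.contains num then some i else d.get? num := by
  induction fila generalizing d with
  | nil => simp
  | cons x rest ih =>
    rw [List.foldl_cons, ih, List.contains_cons]
    by_cases hx : x = num
    · subst hx
      have hor : (x == x || rest.contains x) = true := by simp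
      rw [PySem.Dict.get?_insert_self, if_pos hor]
      simp
    · have hne : num ≠ x := fun hh => hx hh.symm
      rw [PySem.Dict.get?_insert_of_ne d i hne]
      by_cases hr : rest.contains num = true
      · have hor : (num == x || rest.contains num) = true := by rw [hr, Bool.or_true]
        rw [if_pos hr, if_pos hor]
      · have hr' : rest.contains num = false := by simpa using hr
        have hor : (num == x || rest.contains num) = false := by
          rw [hr', Bool.or_false]; simpa using hne
        rw [if_neg hr, if_neg (show ¬((num == x || rest.contains num) = true) by
          rw [hor]; simp)]

-- B's last dictionary: lookup is the last row index containing num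
lemma last_fold_get? (l : List (List Int)) (i : Int) (d : PySem.Dict Int Int) (num : Int) :
    ((PySem.List.enumerate l i).foldl (fun d p =>
        p.2.foldl (fun (d : PySem.Dict Int Int) x => d.insert x p.1) d) d).get? num
      = if l.any (fun f => f.contains num)
          then some (i + l.length - 1 - pvCiclosLoop num l.reverse)
          else d.get? num := by
  induction l generalizing i d with
  | nil => simp [PySem.List.enumerate_nil]
  | cons fila rest ih =>
    rw [PySem.List.enumerate_cons]
    simp only [List.foldl_cons]
    rw [ih, last_inner_get?, List.reverse_cons, pvCiclosLoop_append,
      List.any_cons, List.length_cons]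
    by_cases h2 : (rest.any fun f => f.contains num) = true
    · have hrev : (rest.reverse.any fun f => f.contains num) = true := by
        rw [List.any_reverse]; exact h2
      have hor : (fila.contains num || rest.any fun f => f.contains num) = true := by
        rw [h2, Bool.or_true]
      rw [if_pos h2, if_pos hrev, if_pos hor]
      congr 1; push_cast; ring
    · have h2' : (rest.any fun f => f.contains num) = false := by simpa using h2
      have hrev : (rest.reverse.any fun f => f.contains num) = false := by
        rw [List.any_reverse]; exact h2'
      have hlen : pvCiclosLoop num rest.reverse = rest.reverse.length :=
        pvCiclosLoop_of_not_any num rest.reverse hrev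
      rw [if_neg h2,
        if_neg (show ¬((rest.reverse.any fun f => f.contains num) = true) by
          rw [hrev]; simp)]
      by_cases hf : fila.contains num = true
      · have hor : (fila.contains num || rest.any fun f => f.contains num) = true := by
          rw [hf, Bool.true_or]
        rw [if_pos hf, if_pos hor]
        simp only [pvCiclosLoop, List.length_reverse]
        rw [if_pos hf]
        congr 1; push_cast; ring
      · have hf' : fila.contains num = false := by simpa using hf
        have hor : (fila.contains num || rest.any fun f => f.contains num) = false := by
          rw [hf', h2', Bool.or_false]
        rw [if_neg hf, if_neg (show ¬((fila.contains num || rest.any fun f => f.contains num) = true) by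
          rw [hor]; simp)]

-- B's rec dictionary counts the recent rows containing num
lemma rec_fold_getD (l : List (List Int)) (d : PySem.Dict Int Int) (num : Int) :
    (l.foldl (fun d fila =>
        (PySem.Set.ofList fila).foldl
          (fun (d : PySem.Dict Int Int) x => d.insert x (d.getD x 0 + 1)) d) d).getD num 0
      = d.getD num 0 + (l.countP (fun fila => fila.contains num) : Int) := by
  induction l generalizing d with
  | nil => simp
  | cons fila rest ih =>
    simp only [List.foldl_cons, ih, PySem.Dict.getD_foldl_insert_add_one,
      List.countP_cons]
    have hcnt : ((PySem.Set.ofList fila).count num : Int)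
        = if fila.contains num = true then 1 else 0 := by
      by_cases hm : num ∈ fila
      · have : num ∈ PySem.Set.ofList fila := by
          rw [PySem.Set.mem_ofList]; exact hm
        rw [List.count_eq_one_of_mem (PySem.Set.nodup_ofList fila) this]
        simp [hm]
      · have : num ∉ PySem.Set.ofList fila := by
          rw [PySem.Set.mem_ofList]; exact hm
        rw [List.count_eq_zero_of_not_mem this]
        simp [List.contains_iff_mem, hm]
    rw [hcnt]
    split_ifs with h <;> simp [h] <;> push_cast <;> ring

-- per-number value equality
lemma value_eq (historial : List (List Int)) (num : Int) :
    (analizar_frecuencia historial).getD num 0 * 2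
      + ((((PySem.List.slice historial (some (-3)) none).filter
            (fun fila => fila.contains num)).map (fun _ => (1 : Int))).sum) * 3
      + min (pvCiclosLoop num historial.reverse) 5
    = (historial.foldl (fun d fila =>
          fila.foldl (fun (d : PySem.Dict Int Int) x => d.insert x (d.getD x 0 + 1)) d)
        PySem.Dict.empty).getD num 0 * 2
      + ((PySem.List.slice historial (some (-3)) none).foldl (fun d fila =>
          (PySem.Set.ofList fila).foldl
            (fun (d : PySem.Dict Int Int) x => d.insert x (d.getD x 0 + 1)) d)
        PySem.Dict.empty).getD num 0 * 3
      + min (if ((PySem.List.enumerate historial 0).foldl (fun d p =>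
            p.2.foldl (fun (d : PySem.Dict Int Int) x => d.insert x p.1) d)
          PySem.Dict.empty).contains num
          then (historial.length : Int) - 1
            - ((((PySem.List.enumerate historial 0).foldl (fun d p =>
                p.2.foldl (fun (d : PySem.Dict Int Int) x => d.insert x p.1) d)
              PySem.Dict.empty).get? num).getD 0)
          else (historial.length : Int)) 5 := by
  have hc : (analizar_frecuencia historial).getD num 0
      = ((historial.flatMap id).count num : Int) := by
    simp [analizar_frecuencia, PySem.Dict.getD_counter]
  have hc' := count_fold_getD historial PySem.Dict.empty num
  have hr : ((((PySem.List.slice historial (some (-3)) none).filter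
        (fun fila => fila.contains num)).map (fun _ => (1 : Int))).sum)
      = ((PySem.List.slice historial (some (-3)) none).countP
          (fun fila => fila.contains num) : Int) := by
    rw [PySem.List.sum_map_const_int, List.countP_eq_length_filter]
    push_cast; ring
  have hr' := rec_fold_getD (PySem.List.slice historial (some (-3)) none) PySem.Dict.empty num
  have hl := last_fold_get? historial 0 PySem.Dict.empty num
  rw [hc, hc', hr, hr']
  simp only [PySem.Dict.getD_empty, zero_add]
  by_cases ha : (historial.any fun f => f.contains num) = true
  · have hget : ((PySem.List.enumerate historial 0).foldl (fun d p =>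
          p.2.foldl (fun (d : PySem.Dict Int Int) x => d.insert x p.1) d)
        PySem.Dict.empty).get? num
        = some (0 + (historial.length : Int) - 1 - pvCiclosLoop num historial.reverse) := by
      rw [hl, if_pos ha]
    have hcont : ((PySem.List.enumerate historial 0).foldl (fun d p =>
          p.2.foldl (fun (d : PySem.Dict Int Int) x => d.insert x p.1) d)
        PySem.Dict.empty).contains num = true := by
      rw [PySem.Dict.contains_eq_isSome_get?, hget]; rfl
    rw [hget, hcont, if_pos rfl, Option.getD_some]
    have hb := pvCiclosLoop_bounds num historial.reverse
    rw [List.length_reverse] at hb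
    congr 1
    omega
  · have hget : ((PySem.List.enumerate historial 0).foldl (fun d p =>
          p.2.foldl (fun (d : PySem.Dict Int Int) x => d.insert x p.1) d)
        PySem.Dict.empty).get? num = none := by
      rw [hl, if_neg ha, PySem.Dict.get?_empty]
    have hcont : ((PySem.List.enumerate historial 0).foldl (fun d p =>
          p.2.foldl (fun (d : PySem.Dict Int Int) x => d.insert x p.1) d)
        PySem.Dict.empty).contains num = false := by
      rw [PySem.Dict.contains_eq_isSome_get?, hget]; rfl
    have hn : pvCiclosLoop num historial.reverse = historial.reverse.length :=
      pvCiclosLoop_of_not_any num historial.reverse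
        (by rw [List.any_reverse]; simpa using ha)
    rw [hcont, hn, List.length_reverse]
    simp

-- ===== VERDICT (by name: the statement is the Claim_ definition above) =====
theorem calcular_score_spec : Claim_equal_calcular_score := by
  intro historial _
  unfold Spec_calcular_score calcular_score calcular_score_alt
  dsimp only
  have hfresh : ∀ a ∈ PySem.List.pyRange 1 40 1,
      (PySem.Dict.empty : PySem.Dict Int Int).contains a = false := by
    intro a _; exact PySem.Dict.contains_empty a
  have hnd : ((PySem.List.pyRange 1 40 1).map (fun (x : Int) => x)).Nodup := by decide
  rw [PySem.Dict.items_foldl_insert_fresh (PySem.List.pyRange 1 40 1)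
        (fun (x : Int) => x) _ PySem.Dict.empty hfresh hnd,
      PySem.Dict.items_foldl_insert_fresh (PySem.List.pyRange 1 40 1)
        (fun (x : Int) => x) _ PySem.Dict.empty hfresh hnd]
  simp only [show (PySem.Dict.empty : PySem.Dict Int Int).items = [] from rfl,
    List.nil_append]
  apply List.map_congr_left
  intro num _
  exact congrArg (fun v => (num, v)) (value_eq historial num)
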